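-- pv_equiv track=rewrite | github.com/yhl-amd/ATOM | atom/utils/debug_helper/compare.py | schema_diff
-- ===== SOURCE A (Python) =====
-- def normalize_name(name: str, strip_prefixes: tuple[str, ...] = ("model.",)) -> str:
--     """Strip implementation-specific prefixes for cross-source name matching.
--
--     Example: ATOM uses ``model.layers.0.X``, ref uses ``layers.0.X`` →
--     after ``normalize_name`` both become ``layers.0.X``.
--     """
--     for p in strip_prefixes:
--         if name.startswith(p):
--             return name[len(p) :]
--         if name.startswith("buffer:" + p):
--             return "buffer:" + name[len("buffer:" + p) :]
--     return name
--
-- def schema_diff(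
--     a: dict, b: dict, strip_prefixes: tuple[str, ...] = ("model.",)
-- ) -> tuple[list[str], list[str], list[str]]:
--     """Return (only_a, only_b, common) keys after name normalization.
--
--     Internal underscored keys (e.g. ``_tp_rank``) are excluded.
--     """
--     an = {normalize_name(k, strip_prefixes): k for k in a if not k.startswith("_")}
--     bn = {normalize_name(k, strip_prefixes): k for k in b if not k.startswith("_")}
--     only_a = sorted(set(an) - set(bn))
--     only_b = sorted(set(bn) - set(an))
--     common = sorted(set(an) & set(bn))
--     return only_a, only_b, common
-- ===== SOURCE B (Python) =====
-- def normalize_name(name, strip_prefixes=("model.",)):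
--     for p in strip_prefixes:
--         if name.startswith(p):
--             return name[len(p):]
--         if name.startswith("buffer:" + p):
--             return "buffer:" + name[len("buffer:" + p):]
--     return name
--
-- def schema_diff(a, b, strip_prefixes=("model.",)):
--     # Sort each side's normalized names once, then produce all three buckets by a
--     # single two-pointer merge (like `comm`): no set operations, no membership tests.
--     an = sorted({normalize_name(k, strip_prefixes) for k in a if not k.startswith("_")})
--     bn = sorted({normalize_name(k, strip_prefixes) for k in b if not k.startswith("_")})
--     only_a, only_b, common = [], [], []
--     i = j = 0
--     while i < len(an) and j < len(bn):
--         if an[i] == bn[j]: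
--             common.append(an[i]); i += 1; j += 1
--         elif an[i] < bn[j]:
--             only_a.append(an[i]); i += 1
--         else:
--             only_b.append(bn[j]); j += 1
--     only_a.extend(an[i:])
--     only_b.extend(bn[j:])
--     return only_a, only_b, common
-- ===== Notes on version B (the rewrite author's own statement) =====
-- stated objective: alternative
-- what changed: A computes three separate set operations (difference, reverse difference, intersection) and sorts each result; B instead sorts each side's normalized names once and produces all three buckets simultaneously by a two-pointer merge of the two sorted lists, with no set difference/intersection and no membership tests.
import Mathlib
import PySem

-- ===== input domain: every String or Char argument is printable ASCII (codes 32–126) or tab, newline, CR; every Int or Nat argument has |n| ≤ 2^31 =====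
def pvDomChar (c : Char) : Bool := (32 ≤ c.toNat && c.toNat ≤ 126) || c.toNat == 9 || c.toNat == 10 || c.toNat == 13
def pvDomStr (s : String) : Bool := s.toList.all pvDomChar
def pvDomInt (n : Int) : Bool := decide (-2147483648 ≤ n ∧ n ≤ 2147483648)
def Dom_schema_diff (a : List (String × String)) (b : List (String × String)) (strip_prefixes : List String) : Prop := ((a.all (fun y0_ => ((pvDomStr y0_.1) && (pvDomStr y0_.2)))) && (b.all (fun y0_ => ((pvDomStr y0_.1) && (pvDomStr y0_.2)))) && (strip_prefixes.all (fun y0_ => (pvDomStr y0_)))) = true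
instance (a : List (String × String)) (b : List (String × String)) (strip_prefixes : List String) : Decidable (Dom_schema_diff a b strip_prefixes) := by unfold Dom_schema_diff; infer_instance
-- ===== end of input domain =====

-- B replaces A's three set operations (difference, reverse difference, intersection, each sorted
-- separately) by one sort per side followed by a single two-pointer merge producing all three
-- buckets at once (alternative algorithm); equivalence is proved on the whole domain.

-- ===== PORT A =====
-- shared module helper (used verbatim by both Python versions)
def normalizeName (name : String) (strip_prefixes : List String) : String :=
  match strip_prefixes with
  | [] => name
  | p :: rest =>
    if PySem.Str.startswith name p then
      PySem.Str.slice name (some (PySem.Str.len p)) none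
    else if PySem.Str.startswith name ("buffer:" ++ p) then
      "buffer:" ++ PySem.Str.slice name (some (PySem.Str.len ("buffer:" ++ p))) none
    else normalizeName name rest

def schema_diff (a : List (String × String)) (b : List (String × String)) (strip_prefixes : List String) : List String × List String × List String :=
  -- an/bn: the dict comprehensions; only their key sets are used afterwards
  let an : PySem.Dict String String :=
    a.foldl (fun d kv => if !PySem.Str.startswith kv.1 "_" then d.insert (normalizeName kv.1 strip_prefixes) kv.1 else d) PySem.Dict.empty
  let bn : PySem.Dict String String :=
    b.foldl (fun d kv => if !PySem.Str.startswith kv.1 "_" then d.insert (normalizeName kv.1 strip_prefixes) kv.1 else d) PySem.Dict.empty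
  let only_a := PySem.List.sorted (PySem.Set.diff (PySem.Set.ofList an.keys) (PySem.Set.ofList bn.keys)) (fun x => x) false
  let only_b := PySem.List.sorted (PySem.Set.diff (PySem.Set.ofList bn.keys) (PySem.Set.ofList an.keys)) (fun x => x) false
  let common := PySem.List.sorted (PySem.Set.inter (PySem.Set.ofList an.keys) (PySem.Set.ofList bn.keys)) (fun x => x) false
  (only_a, only_b, common)

-- ===== PORT B =====
-- B's while loop over the two index pointers, as the obvious structural recursion on
-- the two remaining suffixes an[i:], bn[j:]; the final extends are the base cases.
def mergeDiff : List String → List String → List String × List String × List String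
  | [], ys => ([], ys, [])
  | x :: xs, [] => (x :: xs, [], [])
  | x :: xs, y :: ys =>
    if x == y then
      let r := mergeDiff xs ys
      (r.1, r.2.1, x :: r.2.2)
    else if x < y then
      let r := mergeDiff xs (y :: ys)
      (x :: r.1, r.2.1, r.2.2)
    else
      let r := mergeDiff (x :: xs) ys
      (r.1, y :: r.2.1, r.2.2)
termination_by xs ys => xs.length + ys.length

def schema_diff_alt (a : List (String × String)) (b : List (String × String)) (strip_prefixes : List String) : List String × List String × List String :=
  let an := PySem.List.sorted
    (PySem.Set.ofList ((a.filter (fun kv => !PySem.Str.startswith kv.1 "_")).map (fun kv => normalizeName kv.1 strip_prefixes)))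
    (fun x => x) false
  let bn := PySem.List.sorted
    (PySem.Set.ofList ((b.filter (fun kv => !PySem.Str.startswith kv.1 "_")).map (fun kv => normalizeName kv.1 strip_prefixes)))
    (fun x => x) false
  mergeDiff an bn

-- ===== PRECONDITION & SPEC =====
def Spec_schema_diff (a : List (String × String)) (b : List (String × String)) (strip_prefixes : List String) (out : List String × List String × List String) : Prop := out = schema_diff_alt a b strip_prefixes
instance (a : List (String × String)) (b : List (String × String)) (strip_prefixes : List String) (out : List String × List String × List String) : Decidable (Spec_schema_diff a b strip_prefixes out) := by unfold Spec_schema_diff; infer_instance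

-- ===== CLAIM (what is proved, stated in full; the proofs are below) =====
def Claim_equal_schema_diff : Prop := ∀ (a : List (String × String)) (b : List (String × String)) (strip_prefixes : List String), Dom_schema_diff a b strip_prefixes → Spec_schema_diff a b strip_prefixes (schema_diff a b strip_prefixes)

-- ===== LEMMAS AND PROOFS =====

-- keys of the dict built by A's comprehension loop = the set of the mapped filtered keys
theorem keys_insert_eq_add {κ ν : Type} [BEq κ] [LawfulBEq κ] (d : PySem.Dict κ ν) (k : κ) (v : ν) :
    (d.insert k v).keys = PySem.Set.add d.keys k := by
  by_cases hc : d.contains k = true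
  · have hm : k ∈ d.keys := (PySem.Dict.contains_iff_mem_keys d k).mp hc
    rw [PySem.Dict.keys_insert_of_contains d v hc, PySem.Set.add_of_mem hm]
  · have hm : k ∉ d.keys := fun h => hc ((PySem.Dict.contains_iff_mem_keys d k).mpr h)
    rw [PySem.Dict.keys_insert_of_not_contains d v (by simpa using hc), PySem.Set.add_of_not_mem hm]

theorem keys_foldl_comprehension (p : String × String → Bool) (f : String × String → String) :
    ∀ (l : List (String × String)) (d : PySem.Dict String String),
      (l.foldl (fun d kv => if p kv then d.insert (f kv) kv.1 else d) d).keys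
        = PySem.Set.update d.keys ((l.filter p).map f) := by
  intro l
  induction l with
  | nil => intro d; simp [PySem.Set.update]
  | cons kv t ih =>
    intro d
    simp only [List.foldl_cons, List.filter_cons]
    by_cases h : p kv = true
    · rw [if_pos h, if_pos h, ih, keys_insert_eq_add, List.map_cons]
      simp [PySem.Set.update]
    · rw [if_neg h, if_neg h, ih]

theorem keys_foldl_schema (sp : List String) (l : List (String × String)) :
    (l.foldl (fun d kv => if !PySem.Str.startswith kv.1 "_" then d.insert (normalizeName kv.1 sp) kv.1 else d)
        (PySem.Dict.empty : PySem.Dict String String)).keys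
      = PySem.Set.ofList ((l.filter (fun kv => !PySem.Str.startswith kv.1 "_")).map (fun kv => normalizeName kv.1 sp)) :=
  (keys_foldl_comprehension _ _ l PySem.Dict.empty).trans
    (by rw [PySem.Dict.keys_empty, PySem.Set.update_nil_left])

theorem nodup_sorted_id (l : List String) (h : l.Nodup) :
    (PySem.List.sorted l (fun x => x) false).Nodup :=
  (PySem.List.sorted_perm l (fun x => x) false).nodup_iff.mpr h

theorem pairwise_lt_sorted_id (l : List String) (h : l.Nodup) :
    (PySem.List.sorted l (fun x => x) false).Pairwise (· < ·) := by
  have hle : (PySem.List.sorted l (fun x => x) false).Pairwise (fun a b => a ≤ b) :=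
    PySem.List.sorted_pairwise l (fun x => x)
  have hne : (PySem.List.sorted l (fun x => x) false).Pairwise (· ≠ ·) :=
    nodup_sorted_id l h
  exact (hle.and hne).imp (fun ⟨h1, h2⟩ => lt_of_le_of_ne h1 h2)

-- a sorted nodup list characterised by membership and a filter of another sorted nodup list
theorem sorted_eq_filter_sorted (dl u : List String) (p : String → Bool)
    (hd : dl.Nodup) (hu : u.Nodup)
    (hm : ∀ x, x ∈ dl ↔ x ∈ u ∧ p x = true) :
    PySem.List.sorted dl (fun x => x) false
      = (PySem.List.sorted u (fun x => x) false).filter p := by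
  apply PySem.List.sorted_eq_of_perm_of_pairwise_lt
  · apply (List.perm_ext_iff_of_nodup _ hd).mpr
    · intro x
      simp only [List.mem_filter, PySem.List.mem_sorted, hm]
    · exact (nodup_sorted_id u hu).filter p
  · exact (pairwise_lt_sorted_id u hu).filter p

-- characterisation of B's two-pointer merge on strictly increasing lists
theorem mergeDiff_eq : ∀ (xs ys : List String),
    xs.Pairwise (· < ·) → ys.Pairwise (· < ·) →
    mergeDiff xs ys
      = (xs.filter (fun x => !ys.contains x),
         ys.filter (fun y => !xs.contains y),
         xs.filter (fun x => ys.contains x))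
  | [], ys, _, _ => by simp [mergeDiff]
  | x :: xs, [], _, _ => by simp [mergeDiff]
  | x :: xs, y :: ys, hxs, hys => by
    have hx : ∀ z ∈ xs, x < z := (List.pairwise_cons.mp hxs).1
    have hy : ∀ z ∈ ys, y < z := (List.pairwise_cons.mp hys).1
    have hxs' := (List.pairwise_cons.mp hxs).2
    have hys' := (List.pairwise_cons.mp hys).2
    rw [mergeDiff.eq_def]
    by_cases heq : (x == y) = true
    · have hxy : x = y := by simpa using heq
      subst hxy
      simp only [heq, if_true]
      rw [mergeDiff_eq xs ys hxs' hys']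
      have h1 : (xs.filter (fun z => !(x :: ys).contains z)) = xs.filter (fun z => !ys.contains z) := by
        apply List.filter_congr; intro z hz
        have : z ≠ x := ne_of_gt (hx z hz)
        simp [this]
      have h2 : (ys.filter (fun z => !(x :: xs).contains z)) = ys.filter (fun z => !xs.contains z) := by
        apply List.filter_congr; intro z hz
        have : z ≠ x := ne_of_gt (hy z hz)
        simp [this]
      have h3 : (xs.filter (fun z => (x :: ys).contains z)) = xs.filter (fun z => ys.contains z) := by
        apply List.filter_congr; intro z hz
        have : z ≠ x := ne_of_gt (hx z hz)
        simp [this]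
      refine Prod.ext ?_ (Prod.ext ?_ ?_)
      · dsimp only
        rw [List.filter_cons, if_neg (by simp), h1]
      · dsimp only
        rw [List.filter_cons, if_neg (by simp), h2]
      · dsimp only
        rw [List.filter_cons, if_pos (by simp), h3]
    · have hne : x ≠ y := by simpa using heq
      have heq' : (x == y) = false := by simpa using heq
      by_cases hlt : x < y
      · simp only [heq', Bool.false_eq_true, if_false, hlt, if_true]
        rw [mergeDiff_eq xs (y :: ys) hxs' hys]
        have hxys : x ∉ y :: ys := by
          intro h
          rcases List.mem_cons.mp h with h | h
          · exact hne h
          · exact absurd hlt (not_lt.mpr (le_of_lt (hy x h)))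
        have h2 : ((y :: ys).filter (fun z => !(x :: xs).contains z))
            = (y :: ys).filter (fun z => !xs.contains z) := by
          apply List.filter_congr; intro z hz
          have hz' : x < z := by
            rcases List.mem_cons.mp hz with h | h
            · exact h ▸ hlt
            · exact lt_trans hlt (hy z h)
          have : z ≠ x := ne_of_gt hz'
          simp [this]
        refine Prod.ext ?_ (Prod.ext ?_ ?_)
        · show x :: xs.filter (fun z => !(y :: ys).contains z)
              = (x :: xs).filter (fun z => !(y :: ys).contains z)
          rw [List.filter_cons, if_pos (by simpa using hxys)]
        · show (y :: ys).filter (fun z => !xs.contains z)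
              = (y :: ys).filter (fun z => !(x :: xs).contains z)
          exact h2.symm
        · show xs.filter (fun z => (y :: ys).contains z)
              = (x :: xs).filter (fun z => (y :: ys).contains z)
          rw [List.filter_cons, if_neg (by simpa using hxys)]
      · have hyx : y < x := by
          rcases lt_trichotomy x y with h | h | h
          · exact absurd h hlt
          · exact absurd h hne
          · exact h
        simp only [heq', Bool.false_eq_true, if_false, hlt, if_false]
        rw [mergeDiff_eq (x :: xs) ys hxs hys']
        have hyxs : y ∉ x :: xs := by
          intro h
          rcases List.mem_cons.mp h with h | h
          · exact hne h.symm
          · exact absurd hyx (not_lt.mpr (le_of_lt (hx y h)))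
        have hlem : ∀ z ∈ x :: xs, y < z := by
          intro z hz
          rcases List.mem_cons.mp hz with h | h
          · exact h ▸ hyx
          · exact lt_trans hyx (hx z h)
        have h1 : ((x :: xs).filter (fun z => !(y :: ys).contains z))
            = (x :: xs).filter (fun z => !ys.contains z) := by
          apply List.filter_congr; intro z hz
          have : z ≠ y := ne_of_gt (hlem z hz)
          simp [this]
        have h3 : ((x :: xs).filter (fun z => (y :: ys).contains z))
            = (x :: xs).filter (fun z => ys.contains z) := by
          apply List.filter_congr; intro z hz
          have : z ≠ y := ne_of_gt (hlem z hz)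
          simp [this]
        refine Prod.ext ?_ (Prod.ext ?_ ?_)
        · show (x :: xs).filter (fun z => !ys.contains z)
              = (x :: xs).filter (fun z => !(y :: ys).contains z)
          exact h1.symm
        · show y :: ys.filter (fun z => !(x :: xs).contains z)
              = (y :: ys).filter (fun z => !(x :: xs).contains z)
          rw [List.filter_cons, if_pos (by simpa using hyxs)]
        · show (x :: xs).filter (fun z => ys.contains z)
              = (x :: xs).filter (fun z => (y :: ys).contains z)
          exact h3.symm
termination_by xs ys => xs.length + ys.length

-- A's three sorted buckets written as filters of B's two sorted lists
theorem three_buckets (s t : PySem.Set String) (hsn : s.Nodup) (htn : t.Nodup) :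
    (PySem.List.sorted (PySem.Set.diff (PySem.Set.ofList s) (PySem.Set.ofList t)) (fun x => x) false,
     PySem.List.sorted (PySem.Set.diff (PySem.Set.ofList t) (PySem.Set.ofList s)) (fun x => x) false,
     PySem.List.sorted (PySem.Set.inter (PySem.Set.ofList s) (PySem.Set.ofList t)) (fun x => x) false)
      = mergeDiff (PySem.List.sorted s (fun x => x) false) (PySem.List.sorted t (fun x => x) false) := by
  rw [PySem.Set.ofList_eq_self_of_nodup s hsn, PySem.Set.ofList_eq_self_of_nodup t htn]
  rw [mergeDiff_eq _ _ (pairwise_lt_sorted_id s hsn) (pairwise_lt_sorted_id t htn)]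
  refine Prod.ext ?_ (Prod.ext ?_ ?_)
  · apply sorted_eq_filter_sorted _ _ _ (PySem.Set.nodup_diff s t hsn) hsn
    intro x
    simp [PySem.Set.mem_diff, PySem.List.mem_sorted]
  · apply sorted_eq_filter_sorted _ _ _ (PySem.Set.nodup_diff t s htn) htn
    intro x
    simp [PySem.Set.mem_diff, PySem.List.mem_sorted]
  · apply sorted_eq_filter_sorted _ _ _ (PySem.Set.nodup_inter s t hsn) hsn
    intro x
    simp [PySem.Set.mem_inter, PySem.List.mem_sorted]

theorem schema_diff_eq (a b : List (String × String)) (sp : List String) :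
    schema_diff a b sp = schema_diff_alt a b sp := by
  unfold schema_diff schema_diff_alt
  dsimp only
  rw [keys_foldl_schema sp a, keys_foldl_schema sp b]
  exact three_buckets _ _ (PySem.Set.nodup_ofList _) (PySem.Set.nodup_ofList _)

-- ===== VERDICT (by name: the statement is the Claim_ definition above) =====
theorem schema_diff_spec : Claim_equal_schema_diff := by
  intro a b sp _
  unfold Spec_schema_diff
  exact schema_diff_eq a b sp
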